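-- pv_equiv track=rewrite | github.com/arnob56/LeetCode-Solve | 3721. Longest Balanced Subarray II.py | longestBalancedSubarray
-- ===== SOURCE A (Python) =====
-- def longestBalancedSubarray(nums):
--     seen_even = set()
--     seen_odd = set()
--
--     balance = 0
--     first_pos = {0: -1}
--     ans = 0
--
--     for i, x in enumerate(nums):
--         if x % 2 == 0:
--             if x not in seen_even:
--                 seen_even.add(x)
--                 balance += 1
--         else:
--             if x not in seen_odd:
--                 seen_odd.add(x)
--                 balance -= 1
--
--         if balance in first_pos:
--             ans = max(ans, i - first_pos[balance])
--         else:
--             first_pos[balance] = i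
--
--     return ans
-- ===== SOURCE B (Python) =====
-- def longestBalancedSubarray(nums):
--     # pass 1: prefix balances (distinct evens minus distinct odds), seeded for the empty prefix
--     prefixes = [(0, -1)]
--     seen = set()
--     bal = 0
--     for i, x in enumerate(nums):
--         if x not in seen:
--             seen.add(x)
--             bal += 1 if x % 2 == 0 else -1
--         prefixes.append((bal, i))
--     # pass 2: order the (balance, index) pairs by balance, making equal balances contiguous
--     prefixes.sort(key=lambda p: p[0])
--     # pass 3: scan runs of equal balance, tracking the lowest/highest index of each run
--     ans = 0
--     run = None  # (balance, lowest index, highest index)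
--     for b, i in prefixes:
--         if run is None or run[0] != b:
--             run = (b, i, i)
--         else:
--             run = (b, min(run[1], i), max(run[2], i))
--         ans = max(ans, run[2] - run[1])
--     return ans
-- ===== Notes on version B (the rewrite author's own statement) =====
-- stated objective: alternative
-- what changed: B replaces A's online hash-map algorithm (first-occurrence dict with an inline running max) by three staged passes: build the list of (prefix-balance, index) pairs, sort it by balance so equal balances become contiguous, then scan runs of equal balance tracking each run's lowest/highest index.
import Mathlib
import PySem

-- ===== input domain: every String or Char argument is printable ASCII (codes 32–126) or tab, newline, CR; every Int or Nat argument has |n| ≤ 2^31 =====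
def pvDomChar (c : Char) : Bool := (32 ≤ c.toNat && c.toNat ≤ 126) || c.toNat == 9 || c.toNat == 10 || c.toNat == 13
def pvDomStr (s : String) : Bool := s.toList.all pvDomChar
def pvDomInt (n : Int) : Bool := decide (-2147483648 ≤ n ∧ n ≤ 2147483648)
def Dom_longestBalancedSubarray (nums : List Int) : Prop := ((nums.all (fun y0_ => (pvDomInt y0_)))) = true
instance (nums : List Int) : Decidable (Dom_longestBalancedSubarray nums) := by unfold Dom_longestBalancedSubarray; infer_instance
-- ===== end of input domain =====

-- B replaces A's online hash-map (first-occurrence dict + running max) by three staged passes: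
-- build the prefix-balance/index pairs, SORT them by balance, and scan runs of equal balance
-- (alternative decomposition: sort-and-scan instead of hashing; not claimed faster).

-- ===== PORT A =====
-- loop body of A: state = (seen_even, seen_odd, balance, first_pos, ans)
def pvStepA (st : PySem.Set Int × PySem.Set Int × Int × PySem.Dict Int Int × Int)
    (p : Int × Int) : PySem.Set Int × PySem.Set Int × Int × PySem.Dict Int Int × Int :=
  let t : PySem.Set Int × PySem.Set Int × Int :=
    if PySem.Int.mod p.2 2 == 0 then
      if PySem.Set.contains st.1 p.2 then (st.1, st.2.1, st.2.2.1)
      else (PySem.Set.add st.1 p.2, st.2.1, st.2.2.1 + 1)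
    else
      if PySem.Set.contains st.2.1 p.2 then (st.1, st.2.1, st.2.2.1)
      else (st.1, PySem.Set.add st.2.1 p.2, st.2.2.1 - 1)
  match st.2.2.2.1.get? t.2.2 with
  | some v => (t.1, t.2.1, t.2.2, st.2.2.2.1, max st.2.2.2.2 (p.1 - v))
  | none => (t.1, t.2.1, t.2.2, st.2.2.2.1.insert t.2.2 p.1, st.2.2.2.2)

def longestBalancedSubarray (nums : List Int) : Int :=
  ((PySem.List.enumerate nums).foldl pvStepA
    (PySem.Set.empty, PySem.Set.empty, 0, PySem.Dict.ofList [(0, -1)], 0)).2.2.2.2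

-- ===== PORT B =====
-- pass-1 loop body of B: state = (prefixes, seen, bal)
def pvStep1 (st : List (Int × Int) × PySem.Set Int × Int)
    (p : Int × Int) : List (Int × Int) × PySem.Set Int × Int :=
  let t : PySem.Set Int × Int :=
    if PySem.Set.contains st.2.1 p.2 then (st.2.1, st.2.2)
    else (PySem.Set.add st.2.1 p.2,
          st.2.2 + (if PySem.Int.mod p.2 2 == 0 then 1 else -1))
  (st.1 ++ [(t.2, p.1)], t.1, t.2)

-- pass-3 loop body of B: state = (run, ans), run = none | some (balance, lowest idx, highest idx)
def pvStep3 (st : Option (Int × Int × Int) × Int) (p : Int × Int) :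
    Option (Int × Int × Int) × Int :=
  let run : Int × Int × Int :=
    match st.1 with
    | none => (p.1, p.2, p.2)
    | some r => if r.1 != p.1 then (p.1, p.2, p.2)
                else (r.1, min r.2.1 p.2, max r.2.2 p.2)
  (some run, max st.2 (run.2.2 - run.2.1))

def longestBalancedSubarray_alt (nums : List Int) : Int :=
  let s1 := (PySem.List.enumerate nums).foldl pvStep1 ([(0, -1)], PySem.Set.empty, 0)
  let qs := PySem.List.sorted s1.1 (fun p => p.1) false
  (qs.foldl pvStep3 ((none : Option (Int × Int × Int)), 0)).2

-- ===== PRECONDITION & SPEC =====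
def Spec_longestBalancedSubarray (nums : List Int) (out : Int) : Prop := out = longestBalancedSubarray_alt nums
instance (nums : List Int) (out : Int) : Decidable (Spec_longestBalancedSubarray nums out) := by unfold Spec_longestBalancedSubarray; infer_instance

-- ===== CLAIM (what is proved, stated in full; the proofs are below) =====
def Claim_equal_longestBalancedSubarray : Prop := ∀ (nums : List Int), Dom_longestBalancedSubarray nums → Spec_longestBalancedSubarray nums (longestBalancedSubarray nums)

-- ===== LEMMAS AND PROOFS =====

-- Coupling invariant between A's loop state and B's pass-1 state, before processing index s:
-- equal balances; A's parity sets are the parity slices of B's seen set; first_pos holds, for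
-- each balance, the least index among the prefix pairs with that balance; every balance present
-- in the pairs is a key of first_pos; indices are past; ans is an upper bound of, and attained
-- by, the index gaps of equal-balance pairs.
def pvInv (s : Int) (a : PySem.Set Int × PySem.Set Int × Int × PySem.Dict Int Int × Int)
    (b : List (Int × Int) × PySem.Set Int × Int) : Prop :=
  a.2.2.1 = b.2.2 ∧
  (∀ y : Int, a.1.contains y = (b.2.1.contains y && (PySem.Int.mod y 2 == 0))) ∧
  (∀ y : Int, a.2.1.contains y = (b.2.1.contains y && !(PySem.Int.mod y 2 == 0))) ∧
  (∀ k v : Int, a.2.2.2.1.get? k = some v →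
    (k, v) ∈ b.1 ∧ ∀ q ∈ b.1, q.1 = k → v ≤ q.2) ∧
  (∀ q ∈ b.1, a.2.2.2.1.get? q.1 ≠ none) ∧
  (∀ q ∈ b.1, q.2 ≤ s - 1) ∧
  (∀ p ∈ b.1, ∀ q ∈ b.1, p.1 = q.1 → q.2 - p.2 ≤ a.2.2.2.2) ∧
  (∃ p ∈ b.1, ∃ q ∈ b.1, p.1 = q.1 ∧ q.2 - p.2 = a.2.2.2.2) ∧
  0 ≤ a.2.2.2.2

lemma pvBeq_false {y x : Int} (h : y ≠ x) : (y == x) = false := by simpa using h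

lemma pvSet_contains_add (s : PySem.Set Int) (x y : Int) :
    (PySem.Set.add s x).contains y = (PySem.Set.contains s y || y == x) := by
  simp only [PySem.Set.add, PySem.Set.contains]
  split_ifs with h
  · by_cases hyx : y = x
    · subst hyx
      simp only [beq_self_eq_true, Bool.or_true]
      exact h
    · rw [pvBeq_false hyx, Bool.or_false]
  · by_cases hyx : y = x
    · subst hyx
      simp only [beq_self_eq_true, Bool.or_true]
      simp
    · rw [pvBeq_false hyx, Bool.or_false]
      simp [hyx]

-- shared second phase of the two loop bodies: A's first_pos/ans update vs B's list append
lemma pvTail (s nb ans : Int) (se' so' seen' : PySem.Set Int)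
    (fp : PySem.Dict Int Int) (ps : List (Int × Int))
    (hse : ∀ y : Int, se'.contains y = (seen'.contains y && (PySem.Int.mod y 2 == 0)))
    (hso : ∀ y : Int, so'.contains y = (seen'.contains y && !(PySem.Int.mod y 2 == 0)))
    (hfp : ∀ k v : Int, fp.get? k = some v → (k, v) ∈ ps ∧ ∀ q ∈ ps, q.1 = k → v ≤ q.2)
    (hdom : ∀ q ∈ ps, fp.get? q.1 ≠ none)
    (hlast : ∀ q ∈ ps, q.2 ≤ s - 1)
    (hub : ∀ p ∈ ps, ∀ q ∈ ps, p.1 = q.1 → q.2 - p.2 ≤ ans)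
    (hatt : ∃ p ∈ ps, ∃ q ∈ ps, p.1 = q.1 ∧ q.2 - p.2 = ans)
    (hnn : 0 ≤ ans) :
    pvInv (s + 1)
      (match fp.get? nb with
        | some v => (se', so', nb, fp, max ans (s - v))
        | none => (se', so', nb, fp.insert nb s, ans))
      (ps ++ [(nb, s)], seen', nb) := by
  rcases hg : fp.get? nb with _ | f
  · -- balance nb not seen among the pairs: A records first position, B appends the pair
    dsimp only
    refine ⟨rfl, hse, hso, ?_, ?_, ?_, ?_, ?_, hnn⟩
    · intro k v hkv
      rw [PySem.Dict.get?_insert] at hkv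
      by_cases hk : k = nb
      · simp only [hk, if_true, Option.some.injEq] at hkv
        subst hk
        subst hkv
        refine ⟨List.mem_append_right _ List.mem_cons_self, ?_⟩
        intro q hq hq1
        rcases List.mem_append.mp hq with h | h
        · have hd := hdom q h
          rw [hq1] at hd
          exact absurd hg hd
        · simp only [List.mem_singleton] at h
          subst h
          exact le_rfl
      · simp only [hk, if_false] at hkv
        obtain ⟨hm, hmin⟩ := hfp k v hkv
        refine ⟨List.mem_append_left _ hm, ?_⟩
        intro q hq hq1
        rcases List.mem_append.mp hq with h | h
        · exact hmin q h hq1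
        · simp only [List.mem_singleton] at h
          subst h
          exact absurd hq1 (Ne.symm hk)
    · intro q hq
      rcases List.mem_append.mp hq with h | h
      · rw [PySem.Dict.get?_insert]
        by_cases hk : q.1 = nb
        · simp [hk]
        · simp only [hk, if_false]
          exact hdom q h
      · simp only [List.mem_singleton] at h
        subst h
        rw [PySem.Dict.get?_insert]
        simp
    · intro q hq
      rcases List.mem_append.mp hq with h | h
      · have := hlast q h; omega
      · simp only [List.mem_singleton] at h
        subst h
        omega
    · intro p hp q hq hk
      rcases List.mem_append.mp hp with h1 | h1 <;> rcases List.mem_append.mp hq with h2 | h2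
      · exact hub p h1 q h2 hk
      · simp only [List.mem_singleton] at h2
        subst h2
        simp only at hk
        have hd := hdom p h1
        rw [hk] at hd
        exact absurd hg hd
      · simp only [List.mem_singleton] at h1
        subst h1
        simp only at hk
        have hd := hdom q h2
        rw [← hk] at hd
        exact absurd hg hd
      · simp only [List.mem_singleton] at h1 h2
        subst h1; subst h2
        simpa using hnn
    · obtain ⟨p, hp, q, hq, hk, he⟩ := hatt
      exact ⟨p, List.mem_append_left _ hp, q, List.mem_append_left _ hq, hk, he⟩
  · -- balance nb first reached at index f: A bumps ans with s - f, B appends the pair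
    dsimp only
    obtain ⟨hmemf, hminf⟩ := hfp nb f hg
    have hfs : f ≤ s - 1 := hlast (nb, f) hmemf
    refine ⟨rfl, hse, hso, ?_, ?_, ?_, ?_, ?_, le_trans hnn (le_max_left _ _)⟩
    · intro k v hkv
      obtain ⟨hm, hmin⟩ := hfp k v hkv
      refine ⟨List.mem_append_left _ hm, ?_⟩
      intro q hq hq1
      rcases List.mem_append.mp hq with h | h
      · exact hmin q h hq1
      · simp only [List.mem_singleton] at h
        subst h
        simp only at hq1
        subst hq1
        have hg2 := hg
        rw [hkv] at hg2
        have hv : v = f := Option.some.inj hg2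
        omega
    · intro q hq
      rcases List.mem_append.mp hq with h | h
      · exact hdom q h
      · simp only [List.mem_singleton] at h
        subst h
        simp [hg]
    · intro q hq
      rcases List.mem_append.mp hq with h | h
      · have := hlast q h; omega
      · simp only [List.mem_singleton] at h
        subst h
        omega
    · intro p hp q hq hk
      rcases List.mem_append.mp hp with h1 | h1 <;> rcases List.mem_append.mp hq with h2 | h2
      · exact le_trans (hub p h1 q h2 hk) (le_max_left _ _)
      · simp only [List.mem_singleton] at h2
        subst h2
        simp only at hk
        have hf : f ≤ p.2 := hminf p h1 hk
        exact le_trans (by simp only []; omega) (le_max_right _ _)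
      · simp only [List.mem_singleton] at h1
        subst h1
        have hq2 : q.2 ≤ s - 1 := hlast q h2
        exact le_trans (by simp only []; omega) (le_max_left _ _)
      · simp only [List.mem_singleton] at h1 h2
        subst h1; subst h2
        exact le_trans (by simp; omega) (le_max_left _ _)
    · rcases max_choice ans (s - f) with h | h
      · obtain ⟨p, hp, q, hq, hk, he⟩ := hatt
        exact ⟨p, List.mem_append_left _ hp, q, List.mem_append_left _ hq, hk,
          by rw [h]; exact he⟩
      · refine ⟨(nb, f), List.mem_append_left _ hmemf,
          (nb, s), List.mem_append_right _ List.mem_cons_self, rfl, by rw [h]⟩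

lemma pvStep_inv (s x bal ans : Int) (se so seen : PySem.Set Int)
    (fp : PySem.Dict Int Int) (ps : List (Int × Int))
    (h : pvInv s (se, so, bal, fp, ans) (ps, seen, bal)) :
    pvInv (s + 1) (pvStepA (se, so, bal, fp, ans) (s, x)) (pvStep1 (ps, seen, bal) (s, x)) := by
  obtain ⟨-, hse, hso, hfp, hdom, hlast, hub, hatt, hnn⟩ := h
  dsimp only at hse hso hfp hdom hlast hub hatt hnn
  unfold pvStepA pvStep1
  dsimp only
  rcases PySem.Int.mod_two_eq x with hm | hm
  · -- x even
    rw [hm]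
    simp only [beq_self_eq_true, if_true]
    have hcx : se.contains x = seen.contains x := by rw [hse x, hm]; simp
    by_cases hc : seen.contains x
    · simp only [hcx, hc, if_true]
      exact pvTail s bal ans se so seen fp ps hse hso hfp hdom hlast hub hatt hnn
    · simp only [hcx, hc, Bool.false_eq_true, if_false]
      refine pvTail s (bal + 1) ans (se.add x) so (seen.add x) fp ps ?_ ?_
        hfp hdom hlast hub hatt hnn
      · intro y
        rw [pvSet_contains_add, pvSet_contains_add, hse y]
        by_cases hyx : y = x
        · subst hyx
          rw [hm]
          simp only [beq_self_eq_true, Bool.and_true, Bool.or_true]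
        · rw [pvBeq_false hyx, Bool.or_false, Bool.or_false]
      · intro y
        rw [pvSet_contains_add, hso y]
        by_cases hyx : y = x
        · subst hyx
          rw [hm]
          simp only [beq_self_eq_true, Bool.not_true, Bool.and_false]
        · rw [pvBeq_false hyx, Bool.or_false]
  · -- x odd
    rw [hm]
    simp only [Int.reduceBEq, Bool.false_eq_true, if_false]
    have hcx : so.contains x = seen.contains x := by rw [hso x, hm]; simp
    by_cases hc : seen.contains x
    · simp only [hcx, hc, if_true]
      exact pvTail s bal ans se so seen fp ps hse hso hfp hdom hlast hub hatt hnn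
    · simp only [hcx, hc, Bool.false_eq_true, if_false]
      have harith : bal + (-1 : Int) = bal - 1 := by ring
      rw [harith]
      refine pvTail s (bal - 1) ans se (so.add x) (seen.add x) fp ps ?_ ?_
        hfp hdom hlast hub hatt hnn
      · intro y
        rw [pvSet_contains_add, hse y]
        by_cases hyx : y = x
        · subst hyx
          rw [hm]
          simp only [Int.reduceBEq, Bool.and_false]
        · rw [pvBeq_false hyx, Bool.or_false]
      · intro y
        rw [pvSet_contains_add, pvSet_contains_add, hso y]
        by_cases hyx : y = x
        · subst hyx
          rw [hm]
          simp only [Int.reduceBEq, beq_self_eq_true, Bool.or_true, Bool.not_false,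
            Bool.and_true]
        · rw [pvBeq_false hyx, Bool.or_false, Bool.or_false]

lemma pvLoop_inv (nums : List Int) (s : Int)
    (a : PySem.Set Int × PySem.Set Int × Int × PySem.Dict Int Int × Int)
    (b : List (Int × Int) × PySem.Set Int × Int) (h : pvInv s a b) :
    pvInv (s + nums.length) ((PySem.List.enumerate nums s).foldl pvStepA a)
      ((PySem.List.enumerate nums s).foldl pvStep1 b) := by
  induction nums generalizing s a b with
  | nil => simpa using h
  | cons y ys ih =>
      obtain ⟨se, so, bal, fp, ans⟩ := a
      obtain ⟨ps, seen, balb⟩ := b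
      have hb : bal = balb := h.1
      subst hb
      rw [PySem.List.enumerate_cons]
      simp only [List.foldl_cons]
      have h2 := ih (s + 1) _ _ (pvStep_inv s y bal ans se so seen fp ps h)
      have hlen : s + ((y :: ys).length : Int) = (s + 1) + (ys.length : Int) := by
        simp [List.length_cons]; ring
      rw [hlen]
      exact h2

lemma pvInv_init : pvInv 0
    (PySem.Set.empty, PySem.Set.empty, 0, PySem.Dict.ofList [(0, -1)], 0)
    ([(0, -1)], PySem.Set.empty, 0) := by
  have hA : PySem.Dict.ofList [((0 : Int), (-1 : Int))] = PySem.Dict.empty.insert 0 (-1) := by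
    decide
  refine ⟨rfl, fun y => rfl, fun y => rfl, ?_, ?_, ?_, ?_, ?_, le_refl 0⟩
  · intro k v hkv
    rw [hA, PySem.Dict.get?_insert] at hkv
    by_cases hk : k = 0
    · simp only [hk, if_true, Option.some.injEq] at hkv
      subst hk
      subst hkv
      refine ⟨List.mem_cons_self, ?_⟩
      intro q hq _
      simp only [List.mem_singleton] at hq
      subst hq
      exact le_rfl
    · simp only [hk, if_false] at hkv
      exact absurd hkv (by simp [PySem.Dict.empty, PySem.Dict.get?])
  · intro q hq
    simp only [List.mem_singleton] at hq
    subst hq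
    rw [hA, PySem.Dict.get?_insert]
    simp
  · intro q hq
    simp only [List.mem_singleton] at hq
    subst hq
    norm_num
  · intro p hp q hq _
    simp only [List.mem_singleton] at hp hq
    subst hp; subst hq
    norm_num
  · exact ⟨(0, -1), List.mem_cons_self, (0, -1), List.mem_cons_self, rfl, by norm_num⟩

-- ===== B-side: the run scan over the sorted pair list =====

def pvFMin (r : List (Int × Int)) (lo : Int) : Int := r.foldl (fun m q => min m q.2) lo
def pvFMax (r : List (Int × Int)) (hi : Int) : Int := r.foldl (fun m q => max m q.2) hi

lemma pvFMin_le_init (r : List (Int × Int)) (lo : Int) : pvFMin r lo ≤ lo := by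
  induction r generalizing lo with
  | nil => exact le_rfl
  | cons q r ih =>
      exact le_trans (ih (min lo q.2)) (min_le_left _ _)

lemma pvFMin_le_mem (r : List (Int × Int)) (lo : Int) (q : Int × Int) (hq : q ∈ r) :
    pvFMin r lo ≤ q.2 := by
  induction r generalizing lo with
  | nil => cases hq
  | cons q' r ih =>
      rcases List.mem_cons.mp hq with h | h
      · subst h
        exact le_trans (pvFMin_le_init r _) (min_le_right _ _)
      · exact ih _ h

lemma pvFMin_attained (r : List (Int × Int)) (lo : Int) :
    pvFMin r lo = lo ∨ ∃ q ∈ r, pvFMin r lo = q.2 := by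
  induction r generalizing lo with
  | nil => exact Or.inl rfl
  | cons q r ih =>
      rcases ih (min lo q.2) with h | ⟨q', hq', he⟩
      · rcases min_choice lo q.2 with hm | hm
        · exact Or.inl (by simpa [pvFMin, hm] using h)
        · exact Or.inr ⟨q, List.mem_cons_self, by simpa [pvFMin, hm] using h⟩
      · exact Or.inr ⟨q', List.mem_cons_of_mem _ hq', he⟩

lemma pvFMax_init_le (r : List (Int × Int)) (hi : Int) : hi ≤ pvFMax r hi := by
  induction r generalizing hi with
  | nil => exact le_rfl
  | cons q r ih =>
      exact le_trans (le_max_left _ _) (ih (max hi q.2))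

lemma pvFMax_mem_le (r : List (Int × Int)) (hi : Int) (q : Int × Int) (hq : q ∈ r) :
    q.2 ≤ pvFMax r hi := by
  induction r generalizing hi with
  | nil => cases hq
  | cons q' r ih =>
      rcases List.mem_cons.mp hq with h | h
      · subst h
        exact le_trans (le_max_right _ _) (pvFMax_init_le r _)
      · exact ih _ h

lemma pvFMax_attained (r : List (Int × Int)) (hi : Int) :
    pvFMax r hi = hi ∨ ∃ q ∈ r, pvFMax r hi = q.2 := by
  induction r generalizing hi with
  | nil => exact Or.inl rfl
  | cons q r ih =>
      rcases ih (max hi q.2) with h | ⟨q', hq', he⟩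
      · rcases max_choice hi q.2 with hm | hm
        · exact Or.inl (by simpa [pvFMax, hm] using h)
        · exact Or.inr ⟨q, List.mem_cons_self, by simpa [pvFMax, hm] using h⟩
      · exact Or.inr ⟨q', List.mem_cons_of_mem _ hq', he⟩

-- scanning a run of equal balance extends the lowest/highest index and the running max
lemma pvRun (r : List (Int × Int)) (b : Int) (hr : ∀ q ∈ r, q.1 = b) :
    ∀ (lo hi a : Int),
    r.foldl pvStep3 (some (b, lo, hi), max a (hi - lo)) =
      (some (b, pvFMin r lo, pvFMax r hi), max a (pvFMax r hi - pvFMin r lo)) := by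
  induction r with
  | nil => intro lo hi a; rfl
  | cons q r ih =>
      intro lo hi a
      have hq : q.1 = b := hr q List.mem_cons_self
      have hstep : pvStep3 (some (b, lo, hi), max a (hi - lo)) q =
          (some (b, min lo q.2, max hi q.2),
            max (max a (hi - lo)) (max hi q.2 - min lo q.2)) := by
        simp [pvStep3, hq]
      have hmono : hi - lo ≤ max hi q.2 - min lo q.2 :=
        sub_le_sub (le_max_left _ _) (min_le_left _ _)
      have hmax : max (max a (hi - lo)) (max hi q.2 - min lo q.2) =
          max a (max hi q.2 - min lo q.2) := by
        rw [max_assoc, max_eq_right hmono]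
      simp only [List.foldl_cons, hstep, hmax]
      exact ih (fun q' hq' => hr q' (List.mem_cons_of_mem _ hq')) _ _ _

-- a stale run state of a different balance is reset by the first element
lemma pvReset (t0 : Int × Int) (t' : List (Int × Int)) (b lo hi A : Int) (h : b ≠ t0.1) :
    (t0 :: t').foldl pvStep3 (some (b, lo, hi), A) =
      (t0 :: t').foldl pvStep3 (none, A) := by
  simp only [List.foldl_cons]
  have : pvStep3 (some (b, lo, hi), A) t0 = pvStep3 (none, A) t0 := by
    simp [pvStep3, h]
  rw [this]

-- the scan of a balance-sorted list computes the max gap over equal-balance pairs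
lemma pvScan (n : Nat) : ∀ (qs : List (Int × Int)), qs.length ≤ n →
    qs.Pairwise (fun p q => p.1 ≤ q.1) → ∀ a : Int, 0 ≤ a →
    a ≤ (qs.foldl pvStep3 (none, a)).2 ∧
    (∀ p ∈ qs, ∀ q ∈ qs, p.1 = q.1 → q.2 - p.2 ≤ (qs.foldl pvStep3 (none, a)).2) ∧
    ((qs.foldl pvStep3 (none, a)).2 = a ∨
      ∃ p ∈ qs, ∃ q ∈ qs, p.1 = q.1 ∧ q.2 - p.2 = (qs.foldl pvStep3 (none, a)).2) := by
  induction n with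
  | zero =>
      intro qs hlen _ a _
      have hnil : qs = [] := List.eq_nil_of_length_eq_zero (Nat.le_zero.mp hlen)
      subst hnil
      exact ⟨le_rfl, by simp, Or.inl rfl⟩
  | succ m ih =>
      intro qs hlen hpw a ha
      rcases qs with _ | ⟨p, rest⟩
      · exact ⟨le_rfl, by simp, Or.inl rfl⟩
      obtain ⟨hpr, hrpw⟩ := List.pairwise_cons.mp hpw
      have hrt : rest.takeWhile (fun q => q.1 == p.1) ++ rest.dropWhile (fun q => q.1 == p.1)
          = rest := List.takeWhile_append_dropWhile
      have hrb : ∀ q ∈ rest.takeWhile (fun q => q.1 == p.1), q.1 = p.1 := by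
        intro q hq
        simpa using List.mem_takeWhile_imp hq
      -- abbreviations
      have hmemr : ∀ q ∈ rest.takeWhile (fun q => q.1 == p.1), q ∈ p :: rest := by
        intro q hq
        exact List.mem_cons_of_mem _ (by rw [← hrt]; exact List.mem_append_left _ hq)
      have hmemt : ∀ q ∈ rest.dropWhile (fun q => q.1 == p.1), q ∈ p :: rest := by
        intro q hq
        exact List.mem_cons_of_mem _ (by rw [← hrt]; exact List.mem_append_right _ hq)
      have hfold0 : (p :: rest).foldl pvStep3 (none, a) =
          (rest.dropWhile (fun q => q.1 == p.1)).foldl pvStep3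
            (some (p.1, pvFMin (rest.takeWhile (fun q => q.1 == p.1)) p.2,
                        pvFMax (rest.takeWhile (fun q => q.1 == p.1)) p.2),
             max a (pvFMax (rest.takeWhile (fun q => q.1 == p.1)) p.2 -
                    pvFMin (rest.takeWhile (fun q => q.1 == p.1)) p.2)) := by
        conv_lhs => rw [← hrt]
        simp only [List.foldl_cons, List.foldl_append]
        have hstep0 : pvStep3 ((none : Option (Int × Int × Int)), a) p =
            (some (p.1, p.2, p.2), max a (p.2 - p.2)) := rfl
        rw [hstep0, pvRun _ p.1 hrb p.2 p.2 a]
      -- name the run extrema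
      generalize hmn : pvFMin (rest.takeWhile (fun q => q.1 == p.1)) p.2 = mn at hfold0
      generalize hmx : pvFMax (rest.takeWhile (fun q => q.1 == p.1)) p.2 = mx at hfold0
      have hmnp : mn ≤ p.2 := hmn ▸ pvFMin_le_init _ _
      have hmnr : ∀ q ∈ rest.takeWhile (fun q => q.1 == p.1), mn ≤ q.2 := by
        intro q hq; exact hmn ▸ pvFMin_le_mem _ _ q hq
      have hmxp : p.2 ≤ mx := hmx ▸ pvFMax_init_le _ _
      have hmxr : ∀ q ∈ rest.takeWhile (fun q => q.1 == p.1), q.2 ≤ mx := by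
        intro q hq; exact hmx ▸ pvFMax_mem_le _ _ q hq
      have hnnspan : 0 ≤ mx - mn := by omega
      -- a lower witness for mn and an upper witness for mx, inside p :: rest, with key p.1
      have hwmn : ∃ p' ∈ p :: rest, p'.1 = p.1 ∧ p'.2 = mn := by
        rcases hmn ▸ pvFMin_attained (rest.takeWhile (fun q => q.1 == p.1)) p.2 with h | ⟨q, hq, he⟩
        · exact ⟨p, List.mem_cons_self, rfl, h.symm⟩
        · exact ⟨q, hmemr q hq, hrb q hq, he.symm⟩
      have hwmx : ∃ q' ∈ p :: rest, q'.1 = p.1 ∧ q'.2 = mx := by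
        rcases hmx ▸ pvFMax_attained (rest.takeWhile (fun q => q.1 == p.1)) p.2 with h | ⟨q, hq, he⟩
        · exact ⟨p, List.mem_cons_self, rfl, h.symm⟩
        · exact ⟨q, hmemr q hq, hrb q hq, he.symm⟩
      -- membership split: an element of p :: rest is in the run (key p.1, index in [mn, mx]) or in the tail
      have hsplit : ∀ q ∈ p :: rest,
          (q.1 = p.1 ∧ mn ≤ q.2 ∧ q.2 ≤ mx) ∨ q ∈ rest.dropWhile (fun q => q.1 == p.1) := by
        intro q hq
        rcases List.mem_cons.mp hq with h | h
        · exact Or.inl ⟨by rw [h], by rw [h]; exact hmnp, by rw [h]; exact hmxp⟩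
        · rw [← hrt] at h
          rcases List.mem_append.mp h with h | h
          · exact Or.inl ⟨hrb q h, hmnr q h, hmxr q h⟩
          · exact Or.inr h
      rcases hdw : rest.dropWhile (fun q => q.1 == p.1) with _ | ⟨t0, t'⟩
      · -- no further run: the scan ends with the value max a (mx - mn)
        rw [hdw] at hfold0 hsplit
        rw [hfold0]
        simp only [List.foldl_nil]
        refine ⟨le_max_left _ _, ?_, ?_⟩
        · intro p' hp' q' hq' _
          rcases hsplit p' hp' with ⟨_, h1, _⟩ | h; swap; · cases h
          rcases hsplit q' hq' with ⟨_, _, h2⟩ | h; swap; · cases h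
          have : q'.2 - p'.2 ≤ mx - mn := by omega
          exact le_trans this (le_max_right _ _)
        · rcases max_choice a (mx - mn) with h | h
          · exact Or.inl h
          · obtain ⟨p', hp', hk1, he1⟩ := hwmn
            obtain ⟨q', hq', hk2, he2⟩ := hwmx
            exact Or.inr ⟨p', hp', q', hq', by rw [hk1, hk2], by rw [he1, he2]; exact h.symm⟩
      · -- a further run: the stale state is reset; induct on the strictly-larger-key tail
        have hsubl : List.Sublist (rest.dropWhile (fun q => q.1 == p.1)) rest :=
          List.dropWhile_sublist _
        have ht0f : (fun q : Int × Int => q.1 == p.1) t0 = false := by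
          have hne : rest.dropWhile (fun q => q.1 == p.1) ≠ [] := by simp [hdw]
          have h2 := List.head_dropWhile_not (fun q : Int × Int => q.1 == p.1) hne
          simp only [hdw, List.head_cons] at h2
          simpa using h2
        have hne0 : p.1 ≠ t0.1 := by
          intro h
          have hb : (t0.1 == p.1) = false := by simpa using ht0f
          simp [h] at hb
        have ht0m : t0 ∈ rest := hsubl.mem (by rw [hdw]; exact List.mem_cons_self)
        have htpw : (rest.dropWhile (fun q => q.1 == p.1)).Pairwise (fun p q => p.1 ≤ q.1) :=
          hrpw.sublist hsubl
        have htgt : ∀ q ∈ rest.dropWhile (fun q => q.1 == p.1), p.1 < q.1 := by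
          intro q hq
          rw [hdw] at hq htpw
          have hlt0 : p.1 < t0.1 := lt_of_le_of_ne (hpr t0 ht0m) hne0
          rcases List.mem_cons.mp hq with h | h
          · rw [h]; exact hlt0
          · exact lt_of_lt_of_le hlt0 ((List.pairwise_cons.mp htpw).1 q h)
        have htlen : (rest.dropWhile (fun q => q.1 == p.1)).length ≤ m := by
          have h1 : (rest.dropWhile (fun q => q.1 == p.1)).length ≤ rest.length :=
            hsubl.length_le
          have h2 : rest.length + 1 ≤ m + 1 := by simpa using hlen
          omega
        have hreset := pvReset t0 t' p.1 mn mx (max a (mx - mn)) hne0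
        rw [hdw] at hfold0
        rw [hdw] at htpw htgt htlen hsplit
        rw [hfold0, hreset]
        have hA' : (0 : Int) ≤ max a (mx - mn) := le_trans ha (le_max_left _ _)
        obtain ⟨ih1, ih2, ih3⟩ := ih (t0 :: t') htlen htpw (max a (mx - mn)) hA'
        have hAle : max a (mx - mn) ≤ ((t0 :: t').foldl pvStep3 (none, max a (mx - mn))).2 := ih1
        refine ⟨le_trans (le_max_left _ _) hAle, ?_, ?_⟩
        · intro p' hp' q' hq' hk
          rcases hsplit p' hp' with ⟨hk1, h1, h1'⟩ | h1 <;>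
            rcases hsplit q' hq' with ⟨hk2, h2', h2⟩ | h2
          · have : q'.2 - p'.2 ≤ mx - mn := by omega
            exact le_trans this (le_trans (le_max_right _ _) hAle)
          · have hlt := htgt q' h2
            rw [← hk, hk1] at hlt
            exact absurd hlt (lt_irrefl _)
          · have hlt := htgt p' h1
            rw [hk, hk2] at hlt
            exact absurd hlt (lt_irrefl _)
          · exact ih2 p' h1 q' h2 hk
        · rcases ih3 with hv | ⟨p', hp', q', hq', hk, he⟩
          · rcases max_choice a (mx - mn) with h | h
            · exact Or.inl (by rw [hv, h])
            · obtain ⟨p', hp', hk1, he1⟩ := hwmn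
              obtain ⟨q', hq', hk2, he2⟩ := hwmx
              exact Or.inr ⟨p', hp', q', hq', by rw [hk1, hk2],
                by rw [he1, he2, hv, h]⟩
          · exact Or.inr ⟨p', hmemt p' (by rw [hdw]; exact hp'), q',
              hmemt q' (by rw [hdw]; exact hq'), hk, he⟩

-- ===== VERDICT (by name: the statement is the Claim_ definition above) =====
theorem longestBalancedSubarray_spec : Claim_equal_longestBalancedSubarray := by
  intro nums _
  unfold Spec_longestBalancedSubarray longestBalancedSubarray longestBalancedSubarray_alt
  have h := pvLoop_inv nums 0 _ _ pvInv_init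
  obtain ⟨-, -, -, -, -, -, hub, hatt, hnn⟩ := h
  set ps := ((PySem.List.enumerate nums 0).foldl pvStep1 ([(0, -1)], PySem.Set.empty, 0)).1 with hps
  set qs := PySem.List.sorted ps (fun p => p.1) false with hqs
  have hperm : qs.Perm ps := PySem.List.sorted_perm ps (fun p => p.1) false
  have hpw : qs.Pairwise (fun p q => p.1 ≤ q.1) := PySem.List.sorted_pairwise ps (fun p => p.1)
  obtain ⟨h1, h2, h3⟩ := pvScan qs.length qs le_rfl hpw 0 le_rfl
  show _ = ((PySem.List.sorted
      ((PySem.List.enumerate nums 0).foldl pvStep1 ([(0, -1)], PySem.Set.empty, 0)).1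
      (fun p => p.1) false).foldl pvStep3 ((none : Option (Int × Int × Int)), 0)).2
  rw [← hqs]
  refine le_antisymm ?_ ?_
  · obtain ⟨p, hp, q, hq, hk, he⟩ := hatt
    rw [← he]
    exact h2 p (hperm.mem_iff.mpr hp) q (hperm.mem_iff.mpr hq) hk
  · rcases h3 with hv | ⟨p, hp, q, hq, hk, he⟩
    · rw [hv]; exact hnn
    · rw [← he]
      exact hub p (hperm.subset hp) q (hperm.subset hq) hk
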